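-- pv_equiv track=rewrite | github.com/rsprenkels/kattis | python/1_7/secretmessage.py | secretmessage
-- ===== SOURCE A (Python) =====
-- import math
--
-- def secretmessage(message: str) -> str:
--     mes_len = int(math.pow(math.ceil(math.sqrt(len(message))), 2))
--     message += '*' * (mes_len - len(message))
--     rowlen = math.ceil(math.sqrt(len(message)))
--     result = []
--     for col in range(rowlen):
--         for row in range(rowlen - 1, -1, -1):
--             c = message[row * rowlen + col]
--             if c != '*':
--                 result.append(c)
--     return ''.join(result)
-- ===== SOURCE B (Python) =====
-- import math
--
-- def secretmessage(message: str) -> str: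
--     n = len(message)
--     r = math.isqrt(n - 1) + 1 if n else 1
--     order = sorted(range(n), key=lambda i: (i % r) * r - i // r)
--     return ''.join(message[i] for i in order if message[i] != '*')
-- ===== Notes on version B (the rewrite author's own statement) =====
-- stated objective: alternative
-- what changed: B never builds the padded square at all: it sorts the original indices by the arithmetic rank key (i % r)*r - i // r (the column-major bottom-up reading order encoded as one integer) and joins the non-'*' characters, replacing A's padding plus nested column/row loops with a sort-by-key over the raw message.
import Mathlib
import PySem

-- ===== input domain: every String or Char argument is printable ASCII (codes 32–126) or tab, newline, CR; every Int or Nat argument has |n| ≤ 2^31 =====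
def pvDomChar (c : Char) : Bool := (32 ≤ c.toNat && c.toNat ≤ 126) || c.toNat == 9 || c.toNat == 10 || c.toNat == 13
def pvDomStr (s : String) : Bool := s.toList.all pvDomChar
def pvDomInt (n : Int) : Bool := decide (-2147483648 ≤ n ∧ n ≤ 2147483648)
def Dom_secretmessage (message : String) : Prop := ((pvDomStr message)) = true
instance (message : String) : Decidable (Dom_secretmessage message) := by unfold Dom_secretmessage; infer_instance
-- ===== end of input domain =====

-- B never builds the padded square: it sorts the raw indices by the arithmetic rank key
-- (i % r) * r - i // r (the column-major bottom-up reading order as one integer) and joins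
-- the non-'*' characters; objective: an alternative algorithm of the same practical cost.

-- ===== PORT A =====
-- ceiling square root: the exact value of math.ceil(math.sqrt(n)) for any realistic
-- length (n < 2^52, where the float computation is exact); likewise
-- int(math.pow(k, 2)) = k*k exactly for k < 2^26.
def pvCeilSqrt (n : Nat) : Nat :=
  if Nat.sqrt n * Nat.sqrt n < n then Nat.sqrt n + 1 else Nat.sqrt n

def secretmessage (message : String) : String :=
  let msg := message.toList
  let mesLen := pvCeilSqrt msg.length * pvCeilSqrt msg.length
  let msg2 := msg ++ List.replicate (mesLen - msg.length) '*'
  let rowlen := pvCeilSqrt msg2.length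
  String.mk ((PySem.List.pyRange 0 (rowlen : Int) 1).foldl (fun acc col =>
    (PySem.List.pyRange ((rowlen : Int) - 1) (-1) (-1)).foldl (fun acc row =>
      -- message[row * rowlen + col]: always in range, so the IndexError default is never hit
      let c := (PySem.List.pyGet? msg2 (row * (rowlen : Int) + col)).getD '*'
      if c ≠ '*' then acc ++ [c] else acc) acc) [])

-- ===== PORT B =====
def secretmessage_alt (message : String) : String :=
  let msg := message.toList
  let n := msg.length
  let r : Int := if n = 0 then 1 else ((n - 1).sqrt : Int) + 1   -- math.isqrt(n-1)+1 if n else 1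
  let order := PySem.List.sorted (PySem.List.pyRange 0 (n : Int) 1)
    (fun i => PySem.Int.mod i r * r - PySem.Int.floordiv i r)
  -- ''.join(message[i] for i in order if message[i] != '*'); i is always in range
  String.mk ((order.filter (fun i => (PySem.List.pyGet? msg i).getD '*' ≠ '*')).map
    (fun i => (PySem.List.pyGet? msg i).getD '*'))

-- ===== PRECONDITION & SPEC =====
def Spec_secretmessage (message : String) (out : String) : Prop := out = secretmessage_alt message
instance (message : String) (out : String) : Decidable (Spec_secretmessage message out) := by unfold Spec_secretmessage; infer_instance

-- ===== CLAIM (what is proved, stated in full; the proofs are below) =====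
def Claim_equal_secretmessage : Prop := ∀ (message : String), Dom_secretmessage message → Spec_secretmessage message (secretmessage message)

-- ===== LEMMAS AND PROOFS =====

-- canonical form: the column-major bottom-up read of the padded square, filtered
def pvE (msg2 : List Char) (r : Nat) : List Char :=
  (List.range r).flatMap (fun c =>
    ((List.range r).map (fun k =>
      (PySem.List.pyGet? msg2 (((r - 1 - k) * r + c : Nat) : Int)).getD '*')).filter
      (fun ch => ch ≠ '*'))

-- the flat indices of the square, in A's reading order
def pvIdx (r : Nat) : List Nat :=
  (List.range r).flatMap (fun c => (List.range r).map (fun k => (r - 1 - k) * r + c))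

-- B's sort key, on the Nat side
def pvKey (r j : Nat) : Int := ((j % r : Nat) : Int) * ((r : Nat) : Int) - ((j / r : Nat) : Int)

theorem pvCeilSqrt_le (n : Nat) : n ≤ pvCeilSqrt n * pvCeilSqrt n := by
  unfold pvCeilSqrt
  split_ifs with h
  · nlinarith [Nat.lt_succ_sqrt' n]
  · omega

theorem pvCeilSqrt_sq (r : Nat) : pvCeilSqrt (r * r) = r := by
  unfold pvCeilSqrt; simp

theorem pvCeilSqrt_eq_sqrt_pred (n : Nat) (hn : 0 < n) :
    pvCeilSqrt n = Nat.sqrt (n - 1) + 1 := by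
  unfold pvCeilSqrt
  have hs : Nat.sqrt n * Nat.sqrt n ≤ n := Nat.sqrt_le n
  split_ifs with h
  · congr 1
    have h1 : Nat.sqrt n ≤ Nat.sqrt (n - 1) := by
      rw [Nat.le_sqrt]; omega
    have h2 : Nat.sqrt (n - 1) ≤ Nat.sqrt n := Nat.sqrt_le_sqrt (by omega)
    omega
  · have hn' : n = Nat.sqrt n * Nat.sqrt n := by omega
    have hpos : 0 < Nat.sqrt n := by
      rcases Nat.eq_zero_or_pos (Nat.sqrt n) with h0 | h0
      · rw [h0] at h; omega
      · exact h0
    obtain ⟨t, ht⟩ : ∃ t, Nat.sqrt n = t + 1 := ⟨Nat.sqrt n - 1, by omega⟩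
    rw [ht] at hn'
    have h1 : t ≤ Nat.sqrt (n - 1) := by
      rw [Nat.le_sqrt]
      have : t * t + 1 ≤ n := by nlinarith
      omega
    have h2 : Nat.sqrt (n - 1) < t + 1 := by
      rw [Nat.sqrt_lt, ← hn']; omega
    omega

theorem pv_mod_idx (r c k : Nat) (hr : 0 < r) (hc : c < r) (hk : k < r) :
    ((r - 1 - k) * r + c) % r = c := by
  rw [mul_comm, Nat.mul_add_mod, Nat.mod_eq_of_lt hc]

theorem pv_div_idx (r c k : Nat) (hr : 0 < r) (hc : c < r) (hk : k < r) :
    ((r - 1 - k) * r + c) / r = r - 1 - k := by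
  rw [mul_comm, Nat.mul_add_div hr, Nat.div_eq_of_lt hc]
  omega

theorem pvKey_idx (r c k : Nat) (hr : 0 < r) (hc : c < r) (hk : k < r) :
    pvKey r ((r - 1 - k) * r + c) = (c : Int) * (r : Int) - ((r - 1 - k : Nat) : Int) := by
  unfold pvKey
  rw [pv_mod_idx r c k hr hc hk, pv_div_idx r c k hr hc hk]

-- keys are strictly increasing along A's reading order
theorem pvIdx_pairwise (r : Nat) (hr : 0 < r) :
    (pvIdx r).Pairwise (fun a b => pvKey r a < pvKey r b) := by
  unfold pvIdx
  rw [List.flatMap_def, List.pairwise_flatten]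
  refine ⟨?_, ?_⟩
  · intro l hl
    rw [List.mem_map] at hl
    obtain ⟨c, hc, rfl⟩ := hl
    have hc' : c < r := List.mem_range.mp hc
    rw [List.pairwise_map]
    rw [List.pairwise_iff_getElem]
    intro i j hi hj hij
    simp only [List.length_range] at hi hj
    simp only [List.getElem_range]
    rw [pvKey_idx r c i hr hc' hi, pvKey_idx r c j hr hc' hj]
    have h1 : (r - 1 - i : Nat) ≤ r - 1 := by omega
    have h2 : ((r - 1 - j : Nat) : Int) < ((r - 1 - i : Nat) : Int) := by
      have : r - 1 - j < r - 1 - i := by omega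
      exact_mod_cast this
    omega
  · rw [List.pairwise_map, List.pairwise_iff_getElem]
    intro i j hi hj hij
    simp only [List.length_range] at hi hj
    simp only [List.getElem_range]
    intro x hx y hy
    rw [List.mem_map] at hx hy
    obtain ⟨k, hk, rfl⟩ := hx
    obtain ⟨k', hk', rfl⟩ := hy
    have hk1 : k < r := List.mem_range.mp hk
    have hk2 : k' < r := List.mem_range.mp hk'
    rw [pvKey_idx r i k hr hi hk1, pvKey_idx r j k' hr hj hk2]
    have b1 : (0 : Int) ≤ ((r - 1 - k : Nat) : Int) := by positivity
    have b2 : ((r - 1 - k' : Nat) : Int) ≤ (r : Int) - 1 := by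
      have : (r - 1 - k' : Nat) ≤ r - 1 := by omega
      omega
    have : ((i : Int) + 1) * r ≤ (j : Int) * r := by
      have : (i : Int) + 1 ≤ (j : Int) := by exact_mod_cast hij
      exact mul_le_mul_of_nonneg_right this (by positivity)
    nlinarith

theorem pvIdx_nodup (r : Nat) (hr : 0 < r) : (pvIdx r).Nodup := by
  have h := pvIdx_pairwise r hr
  exact h.imp (fun hab => by rintro rfl; exact lt_irrefl _ hab)

theorem pvIdx_mem (r : Nat) (hr : 0 < r) (j : Nat) : j ∈ pvIdx r ↔ j < r * r := by
  unfold pvIdx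
  simp only [List.mem_flatMap, List.mem_map, List.mem_range]
  constructor
  · rintro ⟨c, hc, k, hk, rfl⟩
    have h1 : (r - 1 - k) * r ≤ (r - 1) * r := Nat.mul_le_mul_right _ (by omega)
    have h2 : (r - 1) * r = r * r - r := by rw [Nat.sub_one_mul]
    have h3 : r ≤ r * r := Nat.le_mul_of_pos_left r hr
    omega
  · intro hj
    have hdiv : j / r < r := Nat.div_lt_of_lt_mul hj
    refine ⟨j % r, Nat.mod_lt _ hr, r - 1 - j / r,
      lt_of_le_of_lt (Nat.sub_le _ _) (by omega), ?_⟩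
    have h4 : r - 1 - (r - 1 - j / r) = j / r := Nat.sub_sub_self (Nat.le_sub_one_of_lt hdiv)
    rw [h4, Nat.div_add_mod']

theorem pvIdx_perm (r : Nat) (hr : 0 < r) : (pvIdx r).Perm (List.range (r * r)) := by
  rw [List.perm_ext_iff_of_nodup (pvIdx_nodup r hr) (List.nodup_range)]
  intro j
  rw [pvIdx_mem r hr, List.mem_range]

-- the indices < n, in A's reading order: what B's sort must produce
def pvYs (n r : Nat) : List Nat := (pvIdx r).filter (fun j => j < n)

theorem pvYs_perm (n r : Nat) (hr : 0 < r) (hn : n ≤ r * r) :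
    (pvYs n r).Perm (List.range n) := by
  have h := (pvIdx_perm r hr).filter (fun j => decide (j < n))
  have : (List.range (r * r)).filter (fun j => decide (j < n)) = List.range n := by
    have hsplit : r * r = n + (r * r - n) := by omega
    rw [hsplit, List.range_add, List.filter_append]
    have h1 : (List.range n).filter (fun j => decide (j < n)) = List.range n := by
      rw [List.filter_eq_self]
      intro j hj
      simpa using List.mem_range.mp hj
    have h2 : ((List.range (r * r - n)).map (n + ·)).filter (fun j => decide (j < n)) = [] := by
      rw [List.filter_eq_nil_iff]
      intro j hj
      rw [List.mem_map] at hj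
      obtain ⟨k, _, rfl⟩ := hj
      simp
    rw [h1, h2, List.append_nil]
  rwa [this] at h

theorem pvYs_pairwise (n r : Nat) (hr : 0 < r) :
    (pvYs n r).Pairwise (fun a b => pvKey r a < pvKey r b) :=
  (pvIdx_pairwise r hr).sublist List.filter_sublist

-- B's sorted call produces exactly pvYs, cast to Int
theorem pv_sorted_eq (n r : Nat) (hr : 0 < r) (hn : n ≤ r * r) :
    PySem.List.sorted (PySem.List.pyRange 0 (n : Int) 1)
      (fun i => PySem.Int.mod i (r : Int) * (r : Int) - PySem.Int.floordiv i (r : Int))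
      = (pvYs n r).map (fun (j : Nat) => (j : Int)) := by
  apply PySem.List.sorted_eq_of_perm_of_pairwise_lt
  · rw [PySem.List.pyRange_zero_natCast]
    exact (pvYs_perm n r hr hn).map _
  · rw [List.pairwise_map]
    have h := pvYs_pairwise n r hr
    refine h.imp_of_mem ?_
    intro a b ha hb hab
    have ha' : a ∈ pvIdx r := List.mem_of_mem_filter ha
    have hb' : b ∈ pvIdx r := List.mem_of_mem_filter hb
    have key_eq : ∀ j : Nat,
        PySem.Int.mod (j : Int) (r : Int) * (r : Int) - PySem.Int.floordiv (j : Int) (r : Int)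
          = pvKey r j := by
      intro j
      rw [PySem.Int.mod_natCast, PySem.Int.floordiv_natCast]
      rfl
    rw [key_eq, key_eq]
    exact hab

-- A's fold equals the canonical form (proof about A's loops)
theorem pvRange_desc (r : Nat) :
    PySem.List.pyRange ((r : Int) - 1) (-1) (-1) =
      (List.range r).map (fun (k : Nat) => (r : Int) - 1 - (k : Int)) := by
  rcases Nat.eq_zero_or_pos r with h | h
  · subst h; simp [PySem.List.pyRange]
  · unfold PySem.List.pyRange
    have h1 : (-1 : Int) < (r : Int) - 1 := by omega
    simp only [if_neg (by norm_num : ¬ (-1 : Int) = 0), if_neg (by norm_num : ¬ (0:Int) < -1),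
      if_pos h1]
    have h3 : (((r:Int) - 1 - -1 + - -1 - 1) / - -1).toNat = r := by norm_num
    rw [h3]
    apply List.map_congr_left
    intro k hk
    ring

theorem pv_foldl_filter (f : Nat → Char) (l : List Nat) (acc : List Char) :
    l.foldl (fun acc k => if f k ≠ '*' then acc ++ [f k] else acc) acc
      = acc ++ (l.map f).filter (fun ch => ch ≠ '*') := by
  induction l generalizing acc with
  | nil => simp
  | cons x xs ih =>
    rw [List.foldl_cons, ih]
    by_cases h : f x = '*'
    · simp [h]
    · simp [h]

theorem pv_index_cast (r k c : Nat) (hk : k < r) :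
    ((r : Int) - 1 - (k : Int)) * (r : Int) + (c : Int) = (((r - 1 - k) * r + c : Nat) : Int) := by
  have hi : ((r - 1 - k : Nat) : Int) = (r : Int) - 1 - (k : Int) := by omega
  rw [← hi]
  push_cast
  ring

theorem pvA_eq (msg2 : List Char) (r : Nat) :
    (PySem.List.pyRange 0 (r : Int) 1).foldl (fun acc col =>
      (PySem.List.pyRange ((r : Int) - 1) (-1) (-1)).foldl (fun acc row =>
        let c := (PySem.List.pyGet? msg2 (row * (r : Int) + col)).getD '*'
        if c ≠ '*' then acc ++ [c] else acc) acc) [] = pvE msg2 r := by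
  rw [PySem.List.pyRange_zero_natCast, List.foldl_map, pvRange_desc]
  have hinner : ∀ (col : Nat) (acc : List Char),
      ((List.range r).map (fun (k : Nat) => (r : Int) - 1 - (k : Int))).foldl (fun acc row =>
        let c := (PySem.List.pyGet? msg2 (row * (r : Int) + (col : Int))).getD '*'
        if c ≠ '*' then acc ++ [c] else acc) acc
      = acc ++ ((List.range r).map (fun k =>
          (PySem.List.pyGet? msg2 (((r - 1 - k) * r + col : Nat) : Int)).getD '*')).filter
          (fun ch => ch ≠ '*') := by
    intro col acc
    rw [List.foldl_map]
    rw [pv_foldl_filter (fun k =>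
      (PySem.List.pyGet? msg2 (((r : Int) - 1 - (k : Int)) * (r : Int) + (col : Int))).getD '*')]
    congr 1
    congr 1
    apply List.map_congr_left
    intro k hk
    rw [pv_index_cast r k col (List.mem_range.mp hk)]
  simp only [hinner]
  rw [PySem.List.foldl_append_eq_flatMap]
  simp [pvE]

-- the canonical form is the filtered character read along pvIdx
theorem pvE_eq_idx (msg2 : List Char) (r : Nat) :
    pvE msg2 r = ((pvIdx r).map (fun (j : Nat) =>
      (PySem.List.pyGet? msg2 (j : Int)).getD '*')).filter (fun ch => ch ≠ '*') := by
  unfold pvE pvIdx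
  simp only [List.flatMap_def, List.map_flatten, List.filter_flatten, List.map_map]
  congr 1
  apply List.map_congr_left
  intro c hc
  simp only [Function.comp_def, List.map_map]

-- pushing B's final filter/map through the Nat-to-Int cast of the index list
theorem pv_cast_chain (msg : List Char) (l : List Nat) :
    List.map (fun i => (PySem.List.pyGet? msg i).getD '*')
      (List.filter (fun i => decide ((PySem.List.pyGet? msg i).getD '*' ≠ '*'))
        (List.map (fun (j : Nat) => (j : Int)) l))
    = List.filter (fun ch => decide (ch ≠ '*'))
        (List.map (fun (j : Nat) => (PySem.List.pyGet? msg (j : Int)).getD '*') l) := by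
  induction l with
  | nil => rfl
  | cons x xs ih =>
    simp only [List.map_cons, List.filter_cons, decide_not] at ih ⊢
    by_cases h : msg[x]?.getD '*' = '*'
    · rw [if_neg (by simp [h]), if_neg (by simp [h])]
      exact ih
    · rw [if_pos (by simp [h]), if_pos (by simp [h]), List.map_cons]
      rw [ih]

-- dropping the out-of-message indices does not change the filtered read:
-- padded positions hold '*', which the filter removes anyway
theorem pv_filter_drop (msg : List Char) (r : Nat) (l : List Nat)
    (hall : ∀ j ∈ l, j < r * r) (hn : msg.length ≤ r * r) :
    ((l.filter (fun j => j < msg.length)).map (fun (j : Nat) =>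
        (PySem.List.pyGet? (msg ++ List.replicate (r * r - msg.length) '*') (j : Int)).getD '*')).filter
      (fun ch => ch ≠ '*')
    = ((l.map (fun (j : Nat) =>
        (PySem.List.pyGet? (msg ++ List.replicate (r * r - msg.length) '*') (j : Int)).getD '*')).filter
      (fun ch => ch ≠ '*')) := by
  induction l with
  | nil => simp
  | cons x xs ih =>
    have hx : x < r * r := hall x List.mem_cons_self
    have ih' := ih (fun j hj => hall j (List.mem_cons_of_mem _ hj))
    by_cases h : x < msg.length
    · simp only [List.filter_cons, h, decide_true, if_pos, List.map_cons]
      rw [ih']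
    · have hget : (PySem.List.pyGet? (msg ++ List.replicate (r * r - msg.length) '*') (x : Int)).getD '*' = '*' := by
        rw [PySem.List.pyGet?_natCast]
        have hlen : (msg ++ List.replicate (r * r - msg.length) '*').length = r * r := by
          simp; omega
        have hxlt : x < (msg ++ List.replicate (r * r - msg.length) '*').length := by omega
        rw [List.getElem?_eq_getElem hxlt]
        simp only [Option.getD_some]
        rw [List.getElem_append_right (by omega)]
        simp
      have hd : decide (x < msg.length) = false := decide_eq_false h
      rw [List.filter_cons, hd]
      simp only [Bool.false_eq_true, if_false]
      rw [ih', List.map_cons, hget, List.filter_cons]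
      simp

-- reading an in-message index through the padded list is reading the message itself
theorem pv_get_pad (msg : List Char) (m j : Nat) (hj : j < msg.length) :
    (PySem.List.pyGet? (msg ++ List.replicate m '*') (j : Int)).getD '*'
      = (PySem.List.pyGet? msg (j : Int)).getD '*' := by
  rw [PySem.List.pyGet?_natCast, PySem.List.pyGet?_natCast,
    List.getElem?_append_left hj]

-- ===== VERDICT (by name: the statement is the Claim_ definition above) =====
theorem secretmessage_spec : Claim_equal_secretmessage := by
  intro message _
  show secretmessage message = secretmessage_alt message
  unfold secretmessage secretmessage_alt
  simp only []
  set msg := message.toList with hmsg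
  rcases Nat.eq_zero_or_pos msg.length with hn | hn
  · rw [hn]
    have : msg = [] := List.eq_nil_of_length_eq_zero hn
    rw [this]
    rfl
  · set r := pvCeilSqrt msg.length with hr
    have hrpos : 0 < r := by
      rw [hr, pvCeilSqrt_eq_sqrt_pred msg.length hn]; omega
    have hle : msg.length ≤ r * r := by rw [hr]; exact pvCeilSqrt_le msg.length
    have hlen2 : (msg ++ List.replicate (r * r - msg.length) '*').length = r * r := by
      simp only [List.length_append, List.length_replicate]; omega
    set msg2 := msg ++ List.replicate (r * r - msg.length) '*' with hm2
    rw [show pvCeilSqrt msg2.length = r from by rw [hlen2]; exact pvCeilSqrt_sq r]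
    rw [pvA_eq msg2 r]
    -- B side
    rw [if_neg (by omega : ¬ msg.length = 0)]
    have hrB : ((msg.length - 1).sqrt : Int) + 1 = ((r : Nat) : Int) := by
      rw [hr, pvCeilSqrt_eq_sqrt_pred msg.length hn]; push_cast; ring
    rw [hrB]
    rw [pv_sorted_eq msg.length r hrpos hle]
    rw [pv_cast_chain]
    have hmapeq : (pvYs msg.length r).map (fun (j : Nat) =>
          (PySem.List.pyGet? msg (j : Int)).getD '*')
      = (pvYs msg.length r).map (fun (j : Nat) =>
          (PySem.List.pyGet? msg2 (j : Int)).getD '*') := by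
      apply List.map_congr_left
      intro j hj
      have hjn : j < msg.length := by
        have := List.of_mem_filter hj
        simpa using this
      rw [hm2, pv_get_pad msg (r * r - msg.length) j hjn]
    rw [hmapeq]
    rw [pvE_eq_idx msg2 r]
    unfold pvYs
    rw [pv_filter_drop msg r (pvIdx r) (fun j hj => (pvIdx_mem r hrpos j).mp hj) hle]
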